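-- pv_equiv track=rewrite | github.com/SasakiPeter/AtCoder | ABC/C/099/main.py | getNine
-- ===== SOURCE A (Python) =====
-- def getNine(n):
--     val = 0
--     for p in range(1, n):
--         tmp = 9**p
--         if tmp <= n:
--             val = tmp
--         else:
--             break
--     return val
-- ===== SOURCE B (Python) =====
-- def getNine(n):
--     # Recursive: largest power of 9 (exponent >= 1) that is <= n, else 0.
--     if n < 9:
--         return 0
--     return 9 * max(1, getNine(n // 9))
-- ===== Notes on version B (the rewrite author's own statement) =====
-- stated objective: simpler
-- what changed: Replaced the linear loop over exponents (recomputing 9**p each iteration, with a break) by a three-line recursion on n//9 that rebuilds the answer as 9*max(1, getNine(n//9)).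
import Mathlib
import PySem

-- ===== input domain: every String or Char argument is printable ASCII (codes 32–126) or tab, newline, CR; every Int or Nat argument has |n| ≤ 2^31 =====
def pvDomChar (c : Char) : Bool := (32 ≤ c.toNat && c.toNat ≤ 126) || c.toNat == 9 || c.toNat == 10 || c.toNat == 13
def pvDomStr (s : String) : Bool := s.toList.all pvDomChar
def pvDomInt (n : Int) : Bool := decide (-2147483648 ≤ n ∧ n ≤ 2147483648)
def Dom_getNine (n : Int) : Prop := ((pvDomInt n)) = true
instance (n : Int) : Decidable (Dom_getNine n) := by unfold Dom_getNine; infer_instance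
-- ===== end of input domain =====

-- B replaces A's for-loop over exponents (with break) by a short recursion on n // 9 (simpler; same values everywhere).

-- ===== PORT A =====
-- for p in range(1, n): tmp = 9**p; if tmp <= n: val = tmp else break
-- every p drawn from range(1, n) satisfies 1 ≤ p, so 9**p is exactly 9 ^ p.toNat
-- range(1, n) is iterated lazily (Python never materializes it), so the loop is
-- recursion on the running index p with the range guard p < n
def getNineLoop (n p val : Int) : Int :=
  if _h : p < n then
    let tmp : Int := 9 ^ p.toNat
    if tmp ≤ n then getNineLoop n (p + 1) tmp else val
  else val
termination_by (n - p).toNat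
decreasing_by omega

def getNine (n : Int) : Int := getNineLoop n 1 0

-- ===== PORT B =====
def getNine_alt (n : Int) : Int :=
  if n < 9 then 0
  else 9 * max 1 (getNine_alt (PySem.Int.floordiv n 9))
termination_by n.toNat
decreasing_by
  have hd : PySem.Int.floordiv n 9 = n / 9 := by
    simp [PySem.Int.floordiv]; rw [Int.fdiv_eq_ediv]; simp
  have hlt : n / 9 < n := Int.ediv_lt_of_lt_mul (by norm_num) (by omega)
  have hge : (0:Int) ≤ n / 9 := Int.ediv_nonneg (by omega) (by norm_num)
  rw [hd]; omega

-- ===== PRECONDITION & SPEC =====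
def Spec_getNine (n : Int) (out : Int) : Prop := out = getNine_alt n
instance (n : Int) (out : Int) : Decidable (Spec_getNine n out) := by unfold Spec_getNine; infer_instance

-- ===== CLAIM (what is proved, stated in full; the proofs are below) =====
def Claim_equal_getNine : Prop := ∀ (n : Int), Dom_getNine n → Spec_getNine n (getNine n)

-- ===== LEMMAS AND PROOFS =====

theorem lt_pow_self_int (p : Int) (hp : 1 ≤ p) : p < (9:Int) ^ p.toNat := by
  have h : p.toNat < 9 ^ p.toNat := Nat.lt_pow_self (by norm_num)
  have := (Int.toNat_of_nonneg (by omega : (0:Int) ≤ p))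
  calc p = (p.toNat : Int) := this.symm
    _ < ((9 ^ p.toNat : Nat) : Int) := by exact_mod_cast h
    _ = (9:Int) ^ p.toNat := by push_cast; ring

theorem getNineLoop_pow (k : Nat) : ∀ (p n val : Int), 1 ≤ p →
    (9:Int) ^ (p.toNat + k) ≤ n → n < 9 ^ (p.toNat + k + 1) →
    getNineLoop n p val = 9 ^ (p.toNat + k) := by
  induction k with
  | zero =>
    intro p n val hp hle hlt
    have hpow_le : (9:Int) ^ p.toNat ≤ n := by simpa using hle
    have hpn : p < n := lt_of_lt_of_le (lt_pow_self_int p hp) hpow_le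
    rw [getNineLoop]
    simp only [hpn, dif_pos, hpow_le, if_pos]
    have hsucc : (p + 1).toNat = p.toNat + 1 := by omega
    rw [getNineLoop]
    by_cases hc : p + 1 < n
    · have hbig : ¬ (9:Int) ^ (p + 1).toNat ≤ n := by
        rw [hsucc]; simpa using (not_le.mpr hlt)
      simp [hc, hbig]
    · simp [hc]
  | succ k ih =>
    intro p n val hp hle hlt
    have hmono : (9:Int) ^ p.toNat ≤ 9 ^ (p.toNat + (k + 1)) :=
      pow_le_pow_right₀ (by norm_num) (by omega)
    have hpow_le : (9:Int) ^ p.toNat ≤ n := le_trans hmono hle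
    have hpn : p < n := lt_of_lt_of_le (lt_pow_self_int p hp) hpow_le
    rw [getNineLoop]
    simp only [hpn, dif_pos, hpow_le, if_pos]
    have hsucc : (p + 1).toNat = p.toNat + 1 := by omega
    have := ih (p + 1) n (9 ^ p.toNat) (by omega)
      (by rw [hsucc]; convert hle using 2; omega)
      (by rw [hsucc]; convert hlt using 2; omega)
    rw [this, hsucc]
    congr 1; omega

theorem getNine_small (n : Int) (h : n < 9) : getNine n = 0 := by
  unfold getNine
  rw [getNineLoop]
  by_cases h1 : 1 < n
  · simp only [h1, dif_pos]
    rw [if_neg (by simpa using h)]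
  · simp [h1]

theorem getNine_pow (k : Nat) (n : Int) (hle : (9:Int) ^ (k + 1) ≤ n)
    (hlt : n < 9 ^ (k + 2)) : getNine n = 9 ^ (k + 1) := by
  unfold getNine
  have e1 : (1:Int).toNat + k = k + 1 := by omega
  have e2 : (1:Int).toNat + k + 1 = k + 2 := by omega
  have := getNineLoop_pow k 1 n 0 (le_refl 1) (by rw [e1]; exact hle) (by rw [e2]; exact hlt)
  rw [this, e1]

theorem getNine_alt_small (n : Int) (h : n < 9) : getNine_alt n = 0 := by
  rw [getNine_alt]; simp [h]

theorem getNine_alt_pow (k : Nat) : ∀ (n : Int), (9:Int) ^ (k + 1) ≤ n →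
    n < 9 ^ (k + 2) → getNine_alt n = 9 ^ (k + 1) := by
  induction k with
  | zero =>
    intro n hle hlt
    have h9 : (9:Int) ≤ n := by simpa using hle
    have h81 : n < 81 := by norm_num at hlt; omega
    rw [getNine_alt]
    have hnot : ¬ n < 9 := by omega
    simp only [hnot, if_false]
    have hd : PySem.Int.floordiv n 9 = n / 9 := by
      simp [PySem.Int.floordiv]; rw [Int.fdiv_eq_ediv]; simp
    have hge : (1:Int) ≤ n / 9 := Int.le_ediv_iff_mul_le (by norm_num) |>.mpr (by omega)
    have hlt9 : n / 9 < 9 := Int.ediv_lt_iff_lt_mul (by norm_num) |>.mpr (by omega)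
    rw [hd, getNine_alt_small _ hlt9]
    norm_num
  | succ k ih =>
    intro n hle hlt
    have hbase : (9:Int) ^ (k + 2) ≤ n := by simpa using hle
    have h9 : (9:Int) ≤ n := by
      have : (9:Int) ≤ 9 ^ (k + 2) := by
        calc (9:Int) = 9 ^ 1 := (pow_one 9).symm
          _ ≤ 9 ^ (k + 2) := pow_le_pow_right₀ (by norm_num) (by omega)
      omega
    rw [getNine_alt]
    have hnot : ¬ n < 9 := by omega
    simp only [hnot, if_false]
    have hd : PySem.Int.floordiv n 9 = n / 9 := by
      simp [PySem.Int.floordiv]; rw [Int.fdiv_eq_ediv]; simp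
    have hgq : (9:Int) ^ (k + 1) ≤ n / 9 := by
      apply Int.le_ediv_iff_mul_le (by norm_num) |>.mpr
      calc (9:Int) ^ (k + 1) * 9 = 9 ^ (k + 2) := by ring
        _ ≤ n := hbase
    have hlq : n / 9 < 9 ^ (k + 2) := by
      apply Int.ediv_lt_iff_lt_mul (by norm_num) |>.mpr
      calc n < 9 ^ (k + 3) := by simpa [Nat.add_comm] using hlt
        _ = 9 ^ (k + 2) * 9 := by ring
    rw [hd, ih (n / 9) hgq hlq]
    have hone : (1:Int) ≤ 9 ^ (k + 1) := one_le_pow₀ (by norm_num)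
    rw [max_eq_right hone]
    ring

theorem exists_interval (K : Nat) : ∀ (n : Int), 9 ≤ n → n < 9 ^ (K + 2) →
    ∃ k : Nat, (9:Int) ^ (k + 1) ≤ n ∧ n < 9 ^ (k + 2) := by
  induction K with
  | zero => intro n h9 hlt; exact ⟨0, by simpa using h9, hlt⟩
  | succ K ih =>
    intro n h9 hlt
    by_cases hc : n < 9 ^ (K + 2)
    · exact ih n h9 hc
    · exact ⟨K + 1, by rw [show K + 1 + 1 = K + 2 from rfl]; omega, hlt⟩

-- ===== VERDICT (by name: the statement is the Claim_ definition above) =====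
theorem getNine_spec : Claim_equal_getNine := by
  intro n hdom
  unfold Spec_getNine
  have hbound : n ≤ 2147483648 := by
    simp only [Dom_getNine, pvDomInt, decide_eq_true_eq] at hdom
    omega
  by_cases hsmall : n < 9
  · rw [getNine_small n hsmall, getNine_alt_small n hsmall]
  · rw [not_lt] at hsmall
    have hub : n < (9:Int) ^ (8 + 2) := by norm_num; omega
    obtain ⟨k, hk1, hk2⟩ := exists_interval 8 n hsmall hub
    rw [getNine_pow k n hk1 hk2, getNine_alt_pow k n hk1 hk2]
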